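-- pv_equiv track=rewrite | github.com/mulderns/djangodbu | src/djangodbu/utils.py | get_subqueus_req
-- ===== SOURCE A (Python) =====
-- def get_subqueus_req(elements, first=True):
--     if not elements:
--         # print '-'
--         yield None
--     elif len(elements) == 1:
--         # print ' .', [elements]
--         yield [elements]
--     else:
--         for w in range(1, len(elements)):
--             for rest in get_subqueus_req(elements[w:], first=False):
--                 # if first:
--                 #     print '=> ', [elements[:w]], '+', rest
--                 # else:
--                 #     print '  <-', [elements[:w]], '+', rest
--                 yield [elements[:w]] + rest if rest else [elements]
--         # yield [elements] if first else [elements]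
--         # if first:
--         #     print '=> ', elements
--         # else:
--         #     print ' <=', [elements]
--         yield [elements]
-- ===== SOURCE B (Python) =====
-- def _parts(xs, k, mask):
--     # split xs (which has k gaps) along mask; bit (k-1) = leftmost gap
--     if k == 0:
--         return [xs]
--     rest = _parts(xs[1:], k - 1, mask & ((1 << (k - 1)) - 1))
--     if (mask >> (k - 1)) & 1:
--         return [xs[:1]] + rest
--     return [[xs[0]] + rest[0]] + rest[1:]
--
--
-- def get_subqueus_req(elements, first=True):
--     if not elements:
--         yield None
--         return
--     k = len(elements) - 1
--     for mask in range(2 ** k - 1, -1, -1):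
--         yield _parts(elements, k, mask)
-- ===== Notes on version B (the rewrite author's own statement) =====
-- stated objective: alternative
-- what changed: Replaced A's recursive generator (recursing on every suffix for each first-cut width) by a direct enumeration: iterate a bitmask over the n-1 gaps in descending order and slice the list at the set bits, which reproduces A's exact yield order.
import Mathlib
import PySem

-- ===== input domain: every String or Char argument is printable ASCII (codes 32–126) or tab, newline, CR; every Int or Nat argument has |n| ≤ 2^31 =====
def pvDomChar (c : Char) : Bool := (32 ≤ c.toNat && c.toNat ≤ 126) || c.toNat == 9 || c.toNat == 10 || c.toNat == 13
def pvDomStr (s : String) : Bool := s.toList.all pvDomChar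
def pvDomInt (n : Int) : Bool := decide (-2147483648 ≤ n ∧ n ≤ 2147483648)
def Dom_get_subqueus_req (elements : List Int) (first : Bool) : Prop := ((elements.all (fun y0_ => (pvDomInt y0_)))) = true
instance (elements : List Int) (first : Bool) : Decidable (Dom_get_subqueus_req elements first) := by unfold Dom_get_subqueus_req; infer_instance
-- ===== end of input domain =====

-- B replaces A's recursive generator by a descending-bitmask enumeration of the n-1 cut points
-- (objective: alternative algorithm, same emission order proved equal).


-- ===== PORT A =====
-- literal transliteration of A (a generator: the port returns the list of yielded values;
-- `first` only influenced commented-out prints in A and is threaded through unchanged)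
def get_subqueus_req (elements : List Int) (first : Bool) : List (Option (List (List Int))) :=
  if elements = [] then [none]
  else if elements.length = 1 then [some [elements]]
  else
    ((PySem.List.pyRange 1 (elements.length : Int) 1).attach.flatMap
      (fun w =>
        (get_subqueus_req (PySem.List.slice elements (some w.1) none) false).map
          (fun rest =>
            -- `[elements[:w]] + rest if rest else [elements]`: rest is truthy iff some nonempty list
            match rest with
            | some r => if r ≠ [] then some (PySem.List.slice elements none (some w.1) :: r) else some [elements]
            | none => some [elements])))
    ++ [some [elements]]
termination_by elements.length
decreasing_by
  have hw := (PySem.List.mem_pyRange_one).mp w.2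
  have h0 : (0:Int) ≤ w.1 := by omega
  rw [PySem.List.slice_from elements h0]
  simp only [List.length_drop]
  omega

-- ===== PORT B =====
-- helper `_parts` of Source B: split xs (with k gaps) along mask; bit (k-1) is the leftmost gap.
-- xs[0] is ported as pyGetD xs 0 0 and rest[0] as rest.headD [] (B never reaches them on
-- an empty list: k < len xs at every call).
def pvParts : List Int → Nat → Int → List (List Int)
  | xs, 0, _ => [xs]
  | xs, k+1, mask =>
    let rest := pvParts (PySem.List.slice xs (some 1) none) k (PySem.Int.band mask ((1 <<< k) - 1))
    if PySem.Int.band (mask >>> k) 1 = 1 then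
      PySem.List.slice xs none (some 1) :: rest
    else
      (PySem.List.pyGetD xs 0 0 :: rest.headD []) :: rest.tail

def get_subqueus_req_alt (elements : List Int) (first : Bool) : List (Option (List (List Int))) :=
  if elements = [] then [none]
  else
    let k := elements.length - 1
    (PySem.List.pyRange ((2:Int)^k - 1) (-1) (-1)).map (fun mask => some (pvParts elements k mask))

-- ===== PRECONDITION & SPEC =====
def Spec_get_subqueus_req (elements : List Int) (first : Bool) (out : List (Option (List (List Int)))) : Prop := out = get_subqueus_req_alt elements first
instance (elements : List Int) (first : Bool) (out : List (Option (List (List Int)))) : Decidable (Spec_get_subqueus_req elements first out) := by unfold Spec_get_subqueus_req; infer_instance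

-- ===== CLAIM (what is proved, stated in full; the proofs are below) =====
def Claim_equal_get_subqueus_req : Prop := ∀ (elements : List Int) (first : Bool), Dom_get_subqueus_req elements first → Spec_get_subqueus_req elements first (get_subqueus_req elements first)

-- ===== LEMMAS AND PROOFS =====

-- cast helpers for Python's bit operations on Nat-valued masks
theorem int_shiftRight_natCast (a j : Nat) : ((a : Int) >>> j) = ((a >>> j : Nat) : Int) := by
  simp [Int.shiftRight_eq, Int.natCast_shiftRight]

theorem int_low_bits (a j : Nat) :
    PySem.Int.band (a : Int) (((1 <<< j : Nat) : Int) - 1) = ((a % 2 ^ j : Nat) : Int) := by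
  have h1 : (1:Nat) ≤ 2 ^ j := Nat.one_le_two_pow
  rw [Nat.one_shiftLeft]
  rw [show ((2 ^ j : Nat) : Int) - 1 = ((2 ^ j - 1 : Nat) : Int) by omega]
  rw [PySem.Int.band_natCast, Nat.and_two_pow_sub_one_eq_mod]

theorem int_bit_one (a j : Nat) (h : a >>> j = 1) : PySem.Int.band ((a : Int) >>> j) 1 = 1 := by
  rw [int_shiftRight_natCast, h]; decide

theorem int_bit_zero (a j : Nat) (h : a >>> j = 0) : PySem.Int.band ((a : Int) >>> j) 1 = 0 := by
  rw [int_shiftRight_natCast, h]; decide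

-- mask 0: no cut anywhere, one part
theorem pvParts_zero (k : Nat) (xs : List Int) (h : xs.length = k + 1) :
    pvParts xs k 0 = [xs] := by
  induction k generalizing xs with
  | zero => rfl
  | succ k ih =>
    match xs, h with
    | x :: xs', h =>
      simp only [List.length_cons] at h
      have hxs' : xs'.length = k + 1 := by omega
      simp [pvParts, PySem.List.slice_from_one, List.tail_cons,
        ih xs' hxs', PySem.List.pyGetD_zero_cons, PySem.Int.band]

theorem pvParts_ne_nil (xs : List Int) (k : Nat) (m : Int) : pvParts xs k m ≠ [] := by
  cases k with
  | zero => simp [pvParts]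
  | succ k => simp only [pvParts]; split <;> simp

-- highest set bit at gap w (1 ≤ w ≤ k): first part is take w, the rest splits the drop
theorem pvParts_decomp : ∀ (w : Nat), 1 ≤ w → ∀ (k : Nat) (xs : List Int) (m : Nat),
    xs.length = k + 1 → w ≤ k → m < 2 ^ (k - w) →
    pvParts xs k (((2 ^ (k - w) + m : Nat) : Int))
      = xs.take w :: pvParts (xs.drop w) (k - w) ((m : Nat) : Int) := by
  intro w
  induction w with
  | zero => intro h; omega
  | succ w ih =>
    intro _ k xs m hlen hwk hm
    obtain ⟨k', rfl⟩ : ∃ k', k = k' + 1 := ⟨k - 1, by omega⟩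
    obtain ⟨x, xs', rfl⟩ : ∃ x xs', xs = x :: xs' := by
      cases xs with
      | nil => simp at hlen
      | cons a t => exact ⟨a, t, rfl⟩
    simp only [List.length_cons] at hlen
    have hlen' : xs'.length = k' + 1 := by omega
    by_cases hw0 : w = 0
    · -- first gap is cut: w = 1
      subst hw0
      have he : k' + 1 - 1 = k' := by omega
      rw [he]
      have hbit : (2 ^ k' + m) >>> k' = 1 := by
        rw [Nat.shiftRight_eq_div_pow, Nat.add_comm,
          Nat.add_div_right _ (Nat.two_pow_pos k'),
          Nat.div_eq_of_lt (by rwa [he] at hm)]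
      have hmod : (2 ^ k' + m) % 2 ^ k' = m := by
        rw [Nat.add_mod_left]; exact Nat.mod_eq_of_lt (by rwa [he] at hm)
      simp only [pvParts, int_low_bits, hmod, int_bit_one _ _ hbit, if_true]
      simp [PySem.List.slice_to, PySem.List.slice_from_one]
    · -- first gap uncut: prepend head to the first part of the recursive split
      have hw1 : 1 ≤ w := by omega
      have he : k' + 1 - (w + 1) = k' - w := by omega
      rw [he] at hm ⊢
      have hmask_lt : 2 ^ (k' - w) + m < 2 ^ k' := by
        have h1 : 2 ^ (k' - w) + m < 2 ^ (k' - w + 1) := by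
          rw [pow_succ]; omega
        have h2 : 2 ^ (k' - w + 1) ≤ 2 ^ k' :=
          Nat.pow_le_pow_right (by norm_num) (by omega)
        omega
      have hbit : (2 ^ (k' - w) + m) >>> k' = 0 := by
        rw [Nat.shiftRight_eq_div_pow]; exact Nat.div_eq_of_lt hmask_lt
      have hmod : (2 ^ (k' - w) + m) % 2 ^ k' = 2 ^ (k' - w) + m :=
        Nat.mod_eq_of_lt hmask_lt
      have hcond : ¬ (PySem.Int.band (((2 ^ (k' - w) + m : Nat) : Int) >>> k') 1 = 1) := by
        rw [int_bit_zero _ _ hbit]; decide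
      simp only [pvParts, int_low_bits, hmod, if_neg hcond, PySem.List.slice_from_one,
        List.tail_cons]
      rw [ih hw1 k' xs' m hlen' (by omega) hm]
      simp [PySem.List.pyGetD_zero_cons]

-- splitting a descending power-of-two range into its top and bottom halves
theorem descMap_split {alpha : Type} (e : Nat) (F : Nat → alpha) :
    (List.range (2 ^ (e + 1))).map (fun j => F (2 ^ (e + 1) - 1 - j))
      = (List.range (2 ^ e)).map (fun j => F (2 ^ e + (2 ^ e - 1 - j)))
        ++ (List.range (2 ^ e)).map (fun j => F (2 ^ e - 1 - j)) := by
  have h2 : 2 ^ (e + 1) = 2 ^ e + 2 ^ e := by rw [pow_succ]; omega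
  rw [h2, List.range_add, List.map_append, List.map_map]
  congr 1
  · refine List.map_congr_left (fun j hj => ?_)
    have := List.mem_range.mp hj
    congr 1
    omega
  · refine List.map_congr_left (fun j hj => ?_)
    simp only [Function.comp_apply]
    congr 1
    omega

-- B's port, re-indexed over Nat masks
theorem alt_eq_natMasks (xs : List Int) (first : Bool) (h : xs ≠ []) :
    get_subqueus_req_alt xs first
      = (List.range (2 ^ (xs.length - 1))).map
          (fun j => some (pvParts xs (xs.length - 1) ((2 ^ (xs.length - 1) - 1 - j : Nat) : Int))) := by
  unfold get_subqueus_req_alt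
  rw [if_neg h]
  dsimp only
  rw [PySem.List.pyRange_neg_one, List.map_map]
  have hpow : ((2:Int) ^ (xs.length - 1)) = ((2 ^ (xs.length - 1) : Nat) : Int) := by
    rw [show (2:Int) = ((2:Nat):Int) by norm_num, ← Nat.cast_pow]
  have ha : (((2:Int) ^ (xs.length - 1) - 1) - (-1)).toNat = 2 ^ (xs.length - 1) := by
    have h : ((2:Int) ^ (xs.length - 1) - 1) - (-1) = (2:Int) ^ (xs.length - 1) := by ring
    rw [h, hpow, Int.toNat_natCast]
  rw [ha]
  refine List.map_congr_left (fun j hj => ?_)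
  have hj' := List.mem_range.mp hj
  simp only [Function.comp_apply]
  have h1 : (1:Nat) ≤ 2 ^ (xs.length - 1) := Nat.one_le_two_pow
  have harg : ((2:Int) ^ (xs.length - 1)) - 1 - (j:Int)
      = ((2 ^ (xs.length - 1) - 1 - j : Nat) : Int) := by
    rw [hpow]; omega
  rw [harg]

-- A's loop over cut positions w = w0 .. k, plus the final whole-list yield,
-- produces exactly the masks 2^(k-w0+1)-1 .. 0 in descending order.
theorem pvLoop (k : Nat) (hk : 1 ≤ k) (xs : List Int) (hlen : xs.length = k + 1)
    (IH : ∀ (ys : List Int), ys.length < k + 1 → ys ≠ [] → ∀ (f : Bool),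
      get_subqueus_req ys f
        = (List.range (2 ^ (ys.length - 1))).map
            (fun j => some (pvParts ys (ys.length - 1) ((2 ^ (ys.length - 1) - 1 - j : Nat) : Int)))) :
    ∀ (d : Nat), d ≤ k - 1 →
    ((PySem.List.pyRange ((k - d : Nat) : Int) ((k : Int) + 1) 1).flatMap
      (fun w =>
        (get_subqueus_req (PySem.List.slice xs (some w) none) false).map
          (fun rest =>
            match rest with
            | some r => if r ≠ [] then some (PySem.List.slice xs none (some w) :: r) else some [xs]
            | none => some [xs])))
    ++ [some [xs]]
    = (List.range (2 ^ (d + 1))).map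
        (fun j => some (pvParts xs k ((2 ^ (d + 1) - 1 - j : Nat) : Int))) := by
  intro d
  induction d with
  | zero =>
    intro _
    have e0 : ((k - 0 : Nat) : Int) = (k : Int) := by norm_num
    rw [e0, PySem.List.pyRange_one_singleton, List.flatMap_cons, List.flatMap_nil,
      List.append_nil, PySem.List.slice_from xs (Int.natCast_nonneg k), Int.toNat_natCast]
    have hdk : (xs.drop k).length = 1 := by simp [hlen]
    have hne : xs.drop k ≠ [] := by
      intro hc; rw [hc] at hdk; simp at hdk
    rw [IH (xs.drop k) (by omega) hne false, hdk]
    have h1 : (1:Nat) = 2 ^ (k - k) + 0 := by simp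
    have hm1 : pvParts xs k ((1 : Nat) : Int) = xs.take k :: [xs.drop k] := by
      rw [h1, pvParts_decomp k hk k xs 0 hlen (le_refl k) (by simp),
        Nat.sub_self, Nat.cast_zero, pvParts]
    have hm0 : pvParts xs k ((0 : Nat) : Int) = [xs] := by
      rw [Nat.cast_zero]; exact pvParts_zero k xs hlen
    have hm1' : pvParts xs k (1:Int) = [xs.take k, xs.drop k] := by exact_mod_cast hm1
    have hm0' : pvParts xs k (0:Int) = [xs] := by exact_mod_cast hm0
    simp [List.range_succ, pvParts, PySem.List.slice_to, hm1', hm0']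
  | succ d ihd =>
    intro hd
    have hd' : d ≤ k - 1 := by omega
    have hwn1 : 1 ≤ k - (d + 1) := by omega
    have hcons : PySem.List.pyRange ((k - (d+1) : Nat) : Int) ((k : Int) + 1) 1
        = ((k - (d+1) : Nat) : Int) :: PySem.List.pyRange (((k - (d+1) : Nat) : Int) + 1) ((k : Int) + 1) 1 :=
      PySem.List.pyRange_one_cons (by omega)
    have estep : (((k - (d+1) : Nat) : Int) + 1) = ((k - d : Nat) : Int) := by omega
    rw [hcons, estep, List.flatMap_cons, List.append_assoc, ihd hd',
      PySem.List.slice_from xs (Int.natCast_nonneg _), Int.toNat_natCast]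
    have hlen2 : (xs.drop (k - (d+1))).length = (d + 2) := by simp [hlen]; omega
    have hne : xs.drop (k - (d+1)) ≠ [] := by
      intro hc; rw [hc] at hlen2; simp at hlen2
    rw [IH (xs.drop (k - (d+1))) (by omega) hne false, hlen2]
    simp only [show d + 2 - 1 = d + 1 by omega, List.map_map]
    have hblock : ∀ j, j ∈ List.range (2 ^ (d+1)) →
        ((fun rest =>
            match rest with
            | some r => if r ≠ [] then some (PySem.List.slice xs none (some ((k - (d+1) : Nat) : Int)) :: r) else some [xs]
            | none => some [xs]) ∘
          (fun j => some (pvParts (xs.drop (k - (d+1))) (d + 1) ((2 ^ (d+1) - 1 - j : Nat) : Int)))) j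
        = some (pvParts xs k ((2 ^ (d+1) + (2 ^ (d+1) - 1 - j) : Nat) : Int)) := by
      intro j hj
      simp only [Function.comp_apply]
      rw [if_pos (pvParts_ne_nil _ _ _)]
      have hkw : k - (k - (d+1)) = d + 1 := by omega
      have hdec := pvParts_decomp (k - (d+1)) hwn1 k xs (2 ^ (d+1) - 1 - j) hlen (by omega)
          (by rw [hkw]; have := Nat.one_le_two_pow (n := d+1); omega)
      rw [hkw] at hdec
      rw [hdec]
      simp [PySem.List.slice_to, Int.toNat_natCast]
    rw [List.map_congr_left hblock]
    exact (descMap_split (d+1) (fun m => some (pvParts xs k ((m : Nat) : Int)))).symm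

-- main characterisation of A
theorem A_eq_masks : ∀ (n : Nat), ∀ (xs : List Int), xs.length = n → xs ≠ [] → ∀ (first : Bool),
    get_subqueus_req xs first
      = (List.range (2 ^ (n - 1))).map
          (fun j => some (pvParts xs (n - 1) ((2 ^ (n - 1) - 1 - j : Nat) : Int))) := by
  intro n
  induction n using Nat.strong_induction_on with
  | _ n IHn =>
  intro xs hlen hne first
  match n, hlen with
  | 0, hlen => exact absurd (List.length_eq_zero_iff.mp hlen) hne
  | 1, hlen =>
    rw [get_subqueus_req, if_neg hne, if_pos hlen]
    simp [List.range_one, pvParts]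
  | (m+2), hlen =>
    have hne1 : ¬ xs.length = 1 := by omega
    rw [get_subqueus_req, if_neg hne, if_neg hne1]
    simp only [List.flatMap_subtype, List.unattach_attach]
    have IH' : ∀ (ys : List Int), ys.length < (m + 1) + 1 → ys ≠ [] → ∀ (f : Bool),
        get_subqueus_req ys f
          = (List.range (2 ^ (ys.length - 1))).map
              (fun j => some (pvParts ys (ys.length - 1) ((2 ^ (ys.length - 1) - 1 - j : Nat) : Int))) := by
      intro ys hy hyne f
      exact IHn ys.length (by omega) ys rfl hyne f
    have hloop := pvLoop (m + 1) (by omega) xs hlen IH' m (by omega)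
    have e1 : ((m + 1 - m : Nat) : Int) = 1 := by omega
    have e2 : ((m + 1 : Nat) : Int) + 1 = (xs.length : Int) := by
      rw [hlen]; omega
    rw [e1, e2] at hloop
    have e3 : m + 2 - 1 = m + 1 := by omega
    rw [e3, hloop]

-- ===== VERDICT (by name: the statement is the Claim_ definition above) =====
theorem get_subqueus_req_spec : Claim_equal_get_subqueus_req := by
  intro elements first _
  unfold Spec_get_subqueus_req
  by_cases h : elements = []
  · subst h; simp [get_subqueus_req, get_subqueus_req_alt]
  · rw [A_eq_masks elements.length elements rfl h first, alt_eq_natMasks elements first h]
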